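-- pv_equiv track=rewrite | github.com/yasinhessnawi1/Hideme_Backend | validata/engines_evaluation/total_evaluation.py | find_best_model_for_entity_types
-- ===== SOURCE A (Python) =====
-- def find_best_model_for_entity_types(all_model_data):
--     """
--     Identify which model performs best for each entity type.
--
--     Args:
--         all_model_data (dict): Dictionary with model names as keys and entity counts as values
--
--     Returns:
--         dict: Dictionary with entity types as keys and best model as values
--     """
--     best_model = {}
--
--     # Get all unique entity types
--     all_entity_types = set()
--     for model, entity_counts in all_model_data.items():
--         all_entity_types.update(entity_counts.keys())
--
--     # Find the best model for each entity type
--     for entity_type in all_entity_types: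
--         max_count = 0
--         best_model_name = None
--
--         for model, entity_counts in all_model_data.items():
--             if entity_type in entity_counts and entity_counts[entity_type] > max_count:
--                 max_count = entity_counts[entity_type]
--                 best_model_name = model
--
--         if best_model_name:
--             best_model[entity_type] = (best_model_name, max_count)
--
--     return best_model
-- ===== SOURCE B (Python) =====
-- def find_best_model_for_entity_types(all_model_data):
--     """Single pass over all (model, entity, count) entries, tracking the current
--     best model per entity type; entity order = first-seen order."""
--     order = []
--     best = {}
--     for model, entity_counts in all_model_data.items():
--         for entity, count in entity_counts.items():
--             if entity not in best:
--                 order.append(entity)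
--                 best[entity] = (None, 0)
--             if count > best[entity][1]:
--                 best[entity] = (model, count)
--     return {e: best[e] for e in order if best[e][0]}
-- ===== Notes on version B (the rewrite author's own statement) =====
-- stated objective: faster
-- what changed: Replaces A's per-entity rescan of every model (collect all entity types, then for each type scan all models again) by one single pass over all (model, entity, count) entries that maintains the running maximum per entity type in a dict, with strict-greater updates preserving A's tie-break.
import Mathlib
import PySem

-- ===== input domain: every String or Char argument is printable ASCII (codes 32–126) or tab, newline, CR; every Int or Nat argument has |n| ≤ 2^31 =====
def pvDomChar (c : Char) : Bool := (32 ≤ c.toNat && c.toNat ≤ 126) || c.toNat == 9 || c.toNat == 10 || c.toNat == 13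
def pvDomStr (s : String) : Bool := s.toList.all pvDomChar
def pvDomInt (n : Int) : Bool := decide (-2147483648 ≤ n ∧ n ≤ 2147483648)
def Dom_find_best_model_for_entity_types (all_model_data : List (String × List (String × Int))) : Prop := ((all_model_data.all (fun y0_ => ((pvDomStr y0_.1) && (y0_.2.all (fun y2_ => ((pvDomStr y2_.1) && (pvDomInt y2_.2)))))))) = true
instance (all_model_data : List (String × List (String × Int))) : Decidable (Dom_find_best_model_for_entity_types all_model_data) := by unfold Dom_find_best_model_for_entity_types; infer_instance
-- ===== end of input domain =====

-- B replaces A's per-entity rescan of all models by one pass over all (model, entity, count)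
-- entries, tracking the running max per entity type (objective: faster, O(N) vs O(E*M)).
-- Python set-iteration order is not modelled: both ports emit entity types in first-seen
-- order, and the dict outputs are compared as dicts (order-insensitively) by the tester.


-- ===== PORT A =====
-- inner loop of A: for model, entity_counts in all_model_data.items(): if e in entity_counts and entity_counts[e] > max_count: …
def pvAInner (e : String) (st : Int × Option String) (m : String × List (String × Int)) : Int × Option String :=
  match (PySem.Dict.mk m.2).get? e with
  | some c => if st.1 < c then (c, some m.1) else st
  | none => st

def find_best_model_for_entity_types (all_model_data : List (String × List (String × Int))) : List (String × String × Int) :=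
  -- all_entity_types = set(); update with each model's keys (first-seen order stands in for set order)
  let ets : PySem.Set String :=
    all_model_data.foldl (fun s m => PySem.Set.update s (m.2.map Prod.fst)) PySem.Set.empty
  ets.foldl (fun bm e =>
    let r := all_model_data.foldl (pvAInner e) (0, none)
    match r.2 with
    | some n => if n ≠ "" then bm ++ [(e, n, r.1)] else bm   -- `if best_model_name:` (None / "" falsy)
    | none => bm) []

-- ===== PORT B =====
-- one step of B's single pass: state = (order of first appearance, best-so-far dict)
def pvBStep (model : String) (st : PySem.Set String × PySem.Dict String (Option String × Int))
    (p : String × Int) : PySem.Set String × PySem.Dict String (Option String × Int) :=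
  let o := if st.2.contains p.1 then st.1 else st.1 ++ [p.1]
  let b := if st.2.contains p.1 then st.2 else st.2.insert p.1 (none, 0)
  let b := if (b.getD p.1 (none, 0)).2 < p.2 then b.insert p.1 (some model, p.2) else b
  (o, b)

def find_best_model_for_entity_types_alt (all_model_data : List (String × List (String × Int))) : List (String × String × Int) :=
  let st := all_model_data.foldl (fun st m => m.2.foldl (pvBStep m.1) st)
    (([] : PySem.Set String), (PySem.Dict.empty : PySem.Dict String (Option String × Int)))
  st.1.foldl (fun out e =>
    match st.2.getD e (none, 0) with
    | (some n, c) => if n ≠ "" then out ++ [(e, n, c)] else out   -- `if best[e][0]:`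
    | (none, _) => out) []

-- ===== PRECONDITION & SPEC =====
-- Pre_ excludes only association lists whose inner key lists contain duplicate keys: those do
-- not represent Python dicts (the inner values are dicts in A), so no Python input reaches them.
def Pre_find_best_model_for_entity_types (all_model_data : List (String × List (String × Int))) : Prop :=
  ∀ m ∈ all_model_data, (m.2.map Prod.fst).Nodup
instance (all_model_data : List (String × List (String × Int))) : Decidable (Pre_find_best_model_for_entity_types all_model_data) := by unfold Pre_find_best_model_for_entity_types; infer_instance

def pvWitness_find_best_model_for_entity_types : (List (String × List (String × Int))) :=
  [("model_a", [("PERSON", 3)]), ("model_b", [("PERSON", 5), ("ORG", 2)])]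

def Spec_find_best_model_for_entity_types (all_model_data : List (String × List (String × Int))) (out : List (String × String × Int)) : Prop := out = find_best_model_for_entity_types_alt all_model_data
instance (all_model_data : List (String × List (String × Int))) (out : List (String × String × Int)) : Decidable (Spec_find_best_model_for_entity_types all_model_data out) := by unfold Spec_find_best_model_for_entity_types; infer_instance

-- ===== CLAIM (what is proved, stated in full; the proofs are below) =====
def Claim_equal_find_best_model_for_entity_types : Prop := ∀ (all_model_data : List (String × List (String × Int))), Dom_find_best_model_for_entity_types all_model_data → Pre_find_best_model_for_entity_types all_model_data → Spec_find_best_model_for_entity_types all_model_data (find_best_model_for_entity_types all_model_data)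

-- ===== LEMMAS AND PROOFS =====

theorem pvInnerPres (model : String) (ps : List (String × Int)) (o : PySem.Set String)
    (b : PySem.Dict String (Option String × Int)) (e : String) (he : e ∉ ps.map Prod.fst) :
    ((ps.foldl (pvBStep model) (o, b)).2).getD e (none, 0) = b.getD e (none, 0) := by
  induction ps generalizing o b with
  | nil => rfl
  | cons p t ih =>
    simp only [List.map_cons, List.mem_cons, not_or] at he
    obtain ⟨h1, h2⟩ := he
    simp only [List.foldl_cons]
    rw [show (pvBStep model (o, b) p) = ((pvBStep model (o, b) p).1, (pvBStep model (o, b) p).2) from rfl]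
    rw [ih _ _ h2]
    simp only [pvBStep]
    split_ifs <;> simp_all [PySem.Dict.getD_insert]

theorem pvInnerGetD (model : String) (ps : List (String × Int)) (hnd : (ps.map Prod.fst).Nodup)
    (o : PySem.Set String) (b : PySem.Dict String (Option String × Int)) (e : String) :
    ((ps.foldl (pvBStep model) (o, b)).2).getD e (none, 0) =
      (match (PySem.Dict.mk ps).get? e with
       | some c => if (b.getD e (none, 0)).2 < c then (some model, c) else b.getD e (none, 0)
       | none => b.getD e (none, 0)) := by
  induction ps generalizing o b with
  | nil => rfl
  | cons p t ih =>
    simp only [List.map_cons, List.nodup_cons] at hnd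
    obtain ⟨h1, h2⟩ := hnd
    simp only [List.foldl_cons]
    by_cases hep : e = p.1
    · subst hep
      rw [show (pvBStep model (o, b) p) = ((pvBStep model (o, b) p).1, (pvBStep model (o, b) p).2) from rfl]
      rw [pvInnerPres model t _ _ _ h1]
      have hget : (PySem.Dict.mk (p :: t)).get? p.1 = some p.2 := by
        rw [show (p :: t) = ((p.1, p.2) :: t) from rfl, PySem.Dict.get?_mk_cons]
        simp
      rw [hget]
      simp only [pvBStep]
      by_cases hc : b.contains p.1
      · simp only [hc, if_true]
        split_ifs <;> simp_all [PySem.Dict.getD_insert_self]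
      · have hc' : b.contains p.1 = false := by simpa using hc
        simp only [hc', Bool.false_eq_true, if_false]
        simp [PySem.Dict.getD_insert_self, PySem.Dict.getD_of_not_contains, hc',
          PySem.Dict.insert_insert_self]
        split_ifs <;> simp [PySem.Dict.getD_insert_self]
    · have hget : (PySem.Dict.mk (p :: t)).get? e = (PySem.Dict.mk t).get? e := by
        rw [show (p :: t) = ((p.1, p.2) :: t) from rfl, PySem.Dict.get?_mk_cons]
        simp [Ne.symm hep]
      rw [show (pvBStep model (o, b) p) = ((pvBStep model (o, b) p).1, (pvBStep model (o, b) p).2) from rfl]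
      rw [ih h2]
      have hpr : (pvBStep model (o, b) p).2.getD e (none, 0) = b.getD e (none, 0) := by
        simp only [pvBStep]
        split_ifs <;> simp_all [PySem.Dict.getD_insert]
      rw [hpr, hget]

theorem pvInnerShape (model : String) (ps : List (String × Int)) (o : PySem.Set String)
    (b : PySem.Dict String (Option String × Int)) (hk : b.keys = o) :
    ((ps.foldl (pvBStep model) (o, b)).2).keys = (ps.foldl (pvBStep model) (o, b)).1 ∧
      (ps.foldl (pvBStep model) (o, b)).1 = PySem.Set.update o (ps.map Prod.fst) := by
  induction ps generalizing o b with
  | nil => exact ⟨hk, by simp [PySem.Set.update]⟩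
  | cons p t ih =>
    simp only [List.foldl_cons, List.map_cons]
    have hcc : b.contains p.1 = PySem.Set.contains o p.1 := by
      rw [PySem.Dict.contains_eq_decide_mem_keys, hk]
      simp [PySem.Set.contains]
    have hupd : PySem.Set.update o (p.1 :: List.map Prod.fst t)
        = PySem.Set.update (PySem.Set.add o p.1) (List.map Prod.fst t) := by
      simp [PySem.Set.update]
    rw [hupd]
    by_cases hc : b.contains p.1 = true
    · have hstep : pvBStep model (o, b) p
          = (o, if (b.getD p.1 (none, 0)).2 < p.2 then b.insert p.1 (some model, p.2) else b) := by
        simp [pvBStep, hc]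
      have hoc : PySem.Set.contains o p.1 = true := hcc.symm.trans hc
      have hmem : p.1 ∈ o := by simpa [PySem.Set.contains] using hoc
      have hadd : PySem.Set.add o p.1 = o := by
        simp [PySem.Set.add, hmem]
      have hk' : (if (b.getD p.1 (none, 0)).2 < p.2 then b.insert p.1 (some model, p.2) else b).keys = o := by
        split_ifs
        · rw [PySem.Dict.keys_insert_of_contains _ _ hc, hk]
        · exact hk
      rw [hstep, hadd]
      exact ih o _ hk'
    · have hc' : b.contains p.1 = false := by simpa using hc
      have hstep : pvBStep model (o, b) p
          = (o ++ [p.1], if ((b.insert p.1 (none, 0)).getD p.1 (none, 0)).2 < p.2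
              then (b.insert p.1 (none, 0)).insert p.1 (some model, p.2)
              else b.insert p.1 (none, 0)) := by
        simp [pvBStep, hc']
      have hoc : PySem.Set.contains o p.1 = false := hcc.symm.trans hc'
      have hmem : p.1 ∉ o := by simpa [PySem.Set.contains] using hoc
      have hadd : PySem.Set.add o p.1 = o ++ [p.1] := by
        simp [PySem.Set.add, hmem]
      have hk' : (if ((b.insert p.1 (none, 0)).getD p.1 (none, 0)).2 < p.2
              then (b.insert p.1 (none, 0)).insert p.1 (some model, p.2)
              else b.insert p.1 (none, 0)).keys = o ++ [p.1] := by
        have h1 : (b.insert p.1 (none, 0)).keys = o ++ [p.1] := by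
          rw [PySem.Dict.keys_insert_of_not_contains _ _ hc', hk]
        split_ifs
        · rw [PySem.Dict.keys_insert_of_contains _ _ (PySem.Dict.contains_insert_self b p.1 (none, 0)), h1]
        · exact h1
      rw [hstep, hadd]
      exact ih _ _ hk'

theorem pvOuterGetD (l : List (String × List (String × Int)))
    (hnd : ∀ m ∈ l, (m.2.map Prod.fst).Nodup) (o : PySem.Set String)
    (b : PySem.Dict String (Option String × Int)) (e : String) :
    ((l.foldl (fun st m => m.2.foldl (pvBStep m.1) st) (o, b)).2).getD e (none, 0) =
      ((l.foldl (pvAInner e) ((b.getD e (none, 0)).2, (b.getD e (none, 0)).1)).2,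
       (l.foldl (pvAInner e) ((b.getD e (none, 0)).2, (b.getD e (none, 0)).1)).1) := by
  induction l generalizing o b with
  | nil => simp
  | cons m t ih =>
    have hnd1 : (m.2.map Prod.fst).Nodup := hnd m (by simp)
    have hndt : ∀ x ∈ t, (x.2.map Prod.fst).Nodup := fun x hx => hnd x (by simp [hx])
    simp only [List.foldl_cons]
    rw [show (m.2.foldl (pvBStep m.1) (o, b))
        = ((m.2.foldl (pvBStep m.1) (o, b)).1, (m.2.foldl (pvBStep m.1) (o, b)).2) from rfl]
    rw [ih hndt]
    have hthis : (m.2.foldl (pvBStep m.1) (o, b)).2.getD e (none, 0) =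
        ((pvAInner e ((b.getD e (none, 0)).2, (b.getD e (none, 0)).1) m).2,
         (pvAInner e ((b.getD e (none, 0)).2, (b.getD e (none, 0)).1) m).1) := by
      rw [pvInnerGetD m.1 m.2 hnd1 o b e]
      simp only [pvAInner]
      rcases h : (PySem.Dict.mk m.2).get? e with _ | c
      · simp
      · simp only []
        split_ifs <;> simp
    rw [hthis]

theorem pvOuterShape (l : List (String × List (String × Int))) (o : PySem.Set String)
    (b : PySem.Dict String (Option String × Int)) (hk : b.keys = o) :
    (l.foldl (fun st m => m.2.foldl (pvBStep m.1) st) (o, b)).1 =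
      l.foldl (fun s m => PySem.Set.update s (m.2.map Prod.fst)) o := by
  induction l generalizing o b with
  | nil => rfl
  | cons m t ih =>
    simp only [List.foldl_cons]
    obtain ⟨h1, h2⟩ := pvInnerShape m.1 m.2 o b hk
    rw [show (m.2.foldl (pvBStep m.1) (o, b))
        = ((m.2.foldl (pvBStep m.1) (o, b)).1, (m.2.foldl (pvBStep m.1) (o, b)).2) from rfl]
    rw [ih _ _ (h2 ▸ h1), h2]

-- ===== VERDICT (by name: the statement is the Claim_ definition above) =====
theorem find_best_model_for_entity_types_spec : Claim_equal_find_best_model_for_entity_types := by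
  intro l _ hnd
  unfold Spec_find_best_model_for_entity_types
  simp only [find_best_model_for_entity_types, find_best_model_for_entity_types_alt]
  rw [pvOuterShape l ([]) PySem.Dict.empty rfl]
  congr 1
  funext out e
  have h := pvOuterGetD l hnd ([]) PySem.Dict.empty e
  simp only [PySem.Dict.getD_empty] at h
  rw [h]
  rcases hr : (l.foldl (pvAInner e) (0, none)).2 with _ | n <;> rfl
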